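-- pv_equiv track=rewrite | github.com/soe-un/baekjoon | 15989.py | geThreeCase
-- ===== SOURCE A (Python) =====
-- def geThreeCase(N):
--     cnt = N//3
--     res = 0
--     for c in range(1, cnt+1):
--         tmp = N-(3*c)
--         if (tmp > 1):
--             res += (tmp // 2) + 1
--         else:
--             res += 1
--     return res
-- ===== SOURCE B (Python) =====
-- def geThreeCase(N):
--     # closed form: sum_{c=1}^{k} ((N-3c)//2 + 1), k = N//3, computed in O(1)
--     k = max(N // 3, 0)
--     p = (k + 1) // 2 if N % 2 == 0 else k // 2   # number of odd terms N-3c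
--     return k + (k * N - 3 * k * (k + 1) // 2 - p) // 2
-- ===== Notes on version B (the rewrite author's own statement) =====
-- stated objective: faster
-- what changed: Replaces A's loop that adds one floor-division term per candidate count c with a single closed-form expression: a triangular-number floor-sum plus a parity count of the odd terms, evaluated in constant time.
import Mathlib
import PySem

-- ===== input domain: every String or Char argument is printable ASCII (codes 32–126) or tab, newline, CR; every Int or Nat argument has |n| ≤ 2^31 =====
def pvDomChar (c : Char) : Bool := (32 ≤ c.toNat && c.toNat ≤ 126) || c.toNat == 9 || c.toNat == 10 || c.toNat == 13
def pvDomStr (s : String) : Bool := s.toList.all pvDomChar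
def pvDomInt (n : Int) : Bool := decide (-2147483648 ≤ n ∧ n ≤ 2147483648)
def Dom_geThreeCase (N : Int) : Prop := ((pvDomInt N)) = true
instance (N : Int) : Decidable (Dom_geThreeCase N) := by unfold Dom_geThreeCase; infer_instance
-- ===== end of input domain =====

-- B replaces A's O(N) loop over c=1..N//3 by an O(1) closed-form floor-sum (parity count of the terms).

-- ===== PORT A =====
def geThreeCase (N : Int) : Int :=
  let cnt := PySem.Int.floordiv N 3
  let res : Int := 0
  (PySem.List.pyRange 1 (cnt + 1) 1).foldl
    (fun res c =>
      let tmp := N - 3 * c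
      if tmp > 1 then res + (PySem.Int.floordiv tmp 2 + 1)
      else res + 1) res

-- ===== PORT B =====
def geThreeCase_alt (N : Int) : Int :=
  let k := max (PySem.Int.floordiv N 3) 0
  let p := if PySem.Int.mod N 2 = 0 then PySem.Int.floordiv (k + 1) 2
           else PySem.Int.floordiv k 2
  k + PySem.Int.floordiv (k * N - PySem.Int.floordiv (3 * k * (k + 1)) 2 - p) 2

-- ===== PRECONDITION & SPEC =====
def Spec_geThreeCase (N : Int) (out : Int) : Prop := out = geThreeCase_alt N
instance (N : Int) (out : Int) : Decidable (Spec_geThreeCase N out) := by unfold Spec_geThreeCase; infer_instance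

-- ===== CLAIM (what is proved, stated in full; the proofs are below) =====
def Claim_equal_geThreeCase : Prop := ∀ (N : Int), Dom_geThreeCase N → Spec_geThreeCase N (geThreeCase N)

-- ===== LEMMAS AND PROOFS =====

-- partial sums of A's per-iteration floor terms: pvS N n = Σ_{c=1}^n (N-3c)/2 (Euclidean / = floor, divisor 2 > 0)
def pvS (N : Int) : Nat → Int
  | 0 => 0
  | Nat.succ n => pvS N n + (N - 3 * ((n : Int) + 1)) / 2

-- A's loop, for bounds where every term N-3c is ≥ 0, equals n plus the floor-sum
lemma pvLoop (N : Int) (n : Nat) (h : 3 * (n : Int) ≤ N) :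
    (PySem.List.pyRange 1 ((n : Int) + 1) 1).foldl
      (fun res c =>
        let tmp := N - 3 * c
        if tmp > 1 then res + (PySem.Int.floordiv tmp 2 + 1)
        else res + 1) 0
    = (n : Int) + pvS N n := by
  induction n with
  | zero => simp [pvS]
  | succ n ih =>
    have hn : 3 * (n : Int) ≤ N := by push_cast at h; omega
    have hcast : ((n + 1 : Nat) : Int) + 1 = ((n : Int) + 1) + 1 := by push_cast; ring
    rw [hcast, PySem.List.pyRange_one_succ_right (by omega : (1:Int) ≤ (n : Int) + 1),
        List.foldl_append, ih hn]
    simp only [List.foldl_cons, List.foldl_nil]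
    have hd : PySem.Int.floordiv (N - 3 * ((n : Int) + 1)) 2 = (N - 3 * ((n : Int) + 1)) / 2 :=
      PySem.Int.floordiv_eq_ediv_of_pos (by norm_num)
    have h1 : 3 * ((n : Int) + 1) ≤ N := by push_cast at h; omega
    push_cast
    split_ifs with ht
    · rw [hd]; simp [pvS]; ring
    · have : (N - 3 * ((n : Int) + 1)) / 2 = 0 := by omega
      simp [pvS, this]; ring

-- closed form of the floor-sum, multiplied through by 4 to stay division-light
lemma pvKey (m N S : Int)
    (IH : 4 * S + 2 * (if N % 2 = 0 then (m + 1) / 2 else m / 2) + 3 * m * (m + 1) = 2 * m * N) :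
    4 * (S + (N - 3 * (m + 1)) / 2) + 2 * (if N % 2 = 0 then (m + 2) / 2 else (m + 1) / 2)
      + 3 * (m + 1) * (m + 2) = 2 * (m + 1) * N := by
  have e1 : 3 * (m + 1) * (m + 2) = 3 * m * (m + 1) + (6 * m + 6) := by ring
  have e2 : 2 * (m + 1) * N = 2 * m * N + 2 * N := by ring
  rw [e1, e2]
  generalize hT : 3 * m * (m + 1) = T at IH ⊢
  generalize hU : 2 * m * N = U at IH ⊢
  rcases Int.emod_two_eq_zero_or_one N with hpar | hpar
  · rw [if_pos hpar] at IH
    rw [if_pos hpar]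
    rcases Int.emod_two_eq_zero_or_one m with hm | hm <;> omega
  · have hne : ¬ (N % 2 = 0) := by omega
    rw [if_neg hne] at IH
    rw [if_neg hne]
    rcases Int.emod_two_eq_zero_or_one m with hm | hm <;> omega

lemma pvClosed (N : Int) (n : Nat) :
    4 * pvS N n + 2 * (if N % 2 = 0 then ((n : Int) + 1) / 2 else (n : Int) / 2)
      + 3 * (n : Int) * ((n : Int) + 1) = 2 * (n : Int) * N := by
  induction n with
  | zero =>
    norm_num [pvS]
  | succ n ih =>
    have := pvKey (n : Int) N (pvS N n) ih
    have hc1 : ((n + 1 : Nat) : Int) = (n : Int) + 1 := by push_cast; ring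
    have hc2 : (n : Int) + 1 + 1 = (n : Int) + 2 := by ring
    simp only [pvS, hc1, hc2]
    convert this using 2

lemma pvMain (N : Int) : geThreeCase N = geThreeCase_alt N := by
  unfold geThreeCase geThreeCase_alt
  have h3 : PySem.Int.floordiv N 3 = N / 3 := PySem.Int.floordiv_eq_ediv_of_pos (by norm_num)
  have h2 : PySem.Int.mod N 2 = N % 2 := PySem.Int.mod_eq_emod_of_pos (by norm_num)
  simp only [h3, h2]
  rcases le_or_gt 0 N with hN | hN
  · -- N ≥ 0 : the loop runs c = 1 .. N/3
    have hk : max (N / 3) 0 = N / 3 := max_eq_left (by omega)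
    set n : Nat := (N / 3).toNat with hn
    have hkn : N / 3 = (n : Int) := by omega
    have h3n : 3 * (n : Int) ≤ N := by omega
    rw [hkn, pvLoop N n h3n,
        show max ((n : Int)) 0 = (n : Int) from max_eq_left (by positivity)]
    have hcl := pvClosed N n
    have hdvd : (2 : Int) ∣ 3 * (n : Int) * ((n : Int) + 1) := by
      rcases Int.even_mul_succ_self (n : Int) with ⟨t, ht⟩
      exact ⟨3 * t, by rw [mul_assoc, ht]; ring⟩
    have hd1 : PySem.Int.floordiv (3 * (n : Int) * ((n : Int) + 1)) 2
        = 3 * (n : Int) * ((n : Int) + 1) / 2 := PySem.Int.floordiv_eq_ediv_of_pos (by norm_num)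
    have hd2 : ∀ a : Int, PySem.Int.floordiv a 2 = a / 2 := fun a =>
      PySem.Int.floordiv_eq_ediv_of_pos (by norm_num)
    simp only [hd1, hd2]
    generalize hT : 3 * (n : Int) * ((n : Int) + 1) = T at hcl hdvd ⊢
    generalize hU : (n : Int) * N = U at ⊢
    have hU2 : 2 * (n : Int) * N = 2 * U := by rw [← hU]; ring
    rw [hU2] at hcl
    rcases Int.emod_two_eq_zero_or_one N with hpar | hpar
    · rw [if_pos hpar] at hcl ⊢
      rcases Int.emod_two_eq_zero_or_one (n : Int) with hm | hm <;> omega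
    · have hne : ¬ (N % 2 = 0) := by omega
      rw [if_neg hne] at hcl ⊢
      rcases Int.emod_two_eq_zero_or_one (n : Int) with hm | hm <;> omega
  · -- N < 0 : empty loop on the left, k = 0 on the right
    have hc : N / 3 + 1 ≤ 1 := by omega
    rw [PySem.List.pyRange_one_eq_nil hc]
    have hk : max (N / 3) 0 = 0 := max_eq_right (by omega)
    rw [hk]
    simp only [List.foldl_nil, zero_mul, mul_zero, zero_add, mul_one]
    have hd2 : ∀ a : Int, PySem.Int.floordiv a 2 = a / 2 := fun a =>
      PySem.Int.floordiv_eq_ediv_of_pos (by norm_num)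
    simp only [hd2]
    norm_num

-- ===== VERDICT (by name: the statement is the Claim_ definition above) =====
theorem geThreeCase_spec : Claim_equal_geThreeCase := by
  intro N _
  unfold Spec_geThreeCase
  exact pvMain N
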